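-- pv_equiv track=rewrite | github.com/dipjyotyp/python-practice | playingWithStrings/playingWithStrings.py | work_on_strings
-- ===== SOURCE A (Python) =====
-- def change_case(char):
--     return char.lower() if char.isupper() else char.upper()
--
-- def work_on_strings(a,b):
--     counter = 1
--     while counter < 3:
--         for i in range(len(a)):
--             txt = []
--             for j in range(len(b)):
--                 if a[i].lower() == b[j].lower():
--                     txt.append(change_case(b[j]))
--                 else:
--                     txt.append(b[j])
--             b = ''.join(txt)
--         a,b = b,a
--         counter += 1
--     return a+b
-- ===== SOURCE B (Python) =====
-- def work_on_strings(a, b):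
--     # One pass per string: tally lowercased char frequencies of the other
--     # string once, then toggle a char's case iff its match count is odd.
--     def toggled(s, other):
--         cnt = {}
--         for ch in other:
--             k = ch.lower()
--             cnt[k] = cnt.get(k, 0) + 1
--         out = []
--         for ch in s:
--             if cnt.get(ch.lower(), 0) % 2:
--                 out.append(ch.lower() if ch.isupper() else ch.upper())
--             else:
--                 out.append(ch)
--         return ''.join(out)
--     return toggled(a, b) + toggled(b, a)
-- ===== Notes on version B (the rewrite author's own statement) =====
-- stated objective: faster
-- what changed: A rewrites the whole other string once per character (two nested loops, repeated for both strings); B tallies lowercased character frequencies of each string once in a dict and toggles a character's case iff its match count is odd, in one pass per string.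
import Mathlib
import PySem

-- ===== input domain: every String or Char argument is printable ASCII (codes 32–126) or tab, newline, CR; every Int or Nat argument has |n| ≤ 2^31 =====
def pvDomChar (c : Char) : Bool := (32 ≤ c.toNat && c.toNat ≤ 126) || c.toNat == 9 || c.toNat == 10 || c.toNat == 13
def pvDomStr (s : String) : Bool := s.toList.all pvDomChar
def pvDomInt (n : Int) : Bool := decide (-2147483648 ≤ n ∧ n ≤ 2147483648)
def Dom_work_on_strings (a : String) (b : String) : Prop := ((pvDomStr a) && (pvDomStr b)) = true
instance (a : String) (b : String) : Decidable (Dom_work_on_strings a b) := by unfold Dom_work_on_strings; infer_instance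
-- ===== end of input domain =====

-- B replaces A's O(|a|·|b|) repeated rewriting of one string per character of the
-- other by a single frequency tally per string and one toggle pass (O(|a|+|b|)).

-- ===== PORT A =====
-- change_case(char)
def change_case (c : Char) : Char :=
  if PySem.Chars.isupper c then PySem.Chars.lowerChar c else PySem.Chars.upperChar c

-- inner 'for j in range(len(b)): txt.append(...)' then ''.join(txt)
def woSInner (ai : Char) (b : List Char) : List Char :=
  b.map (fun bj => if PySem.Chars.lowerChar ai = PySem.Chars.lowerChar bj then change_case bj else bj)

-- 'for i in range(len(a)): ... b = ''.join(txt)'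
def woSPass (a b : List Char) : List Char :=
  a.foldl (fun b' ai => woSInner ai b') b

-- 'while counter < 3' runs the body exactly twice; each body step is
-- 'b = pass(a, b); a, b = b, a'
def woSLoop : Nat → List Char × List Char → List Char × List Char
  | 0, p => p
  | n + 1, (a, b) => woSLoop n (woSPass a b, a)

def work_on_strings (a : String) (b : String) : String :=
  let p := woSLoop 2 (a.toList, b.toList)
  String.ofList (p.1 ++ p.2)

-- ===== PORT B =====
-- 'cnt = {}; for ch in other: cnt[k] = cnt.get(k, 0) + 1' with k = ch.lower()
def altCount (other : List Char) : PySem.Dict Char Int :=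
  other.foldl
    (fun d ch =>
      d.insert (PySem.Chars.lowerChar ch) (d.getD (PySem.Chars.lowerChar ch) 0 + 1))
    PySem.Dict.empty

-- 'out = []; for ch in s: ...; return ''.join(out)'
def altToggled (s other : List Char) : List Char :=
  let cnt := altCount other
  s.map (fun ch =>
    if PySem.Int.mod (cnt.getD (PySem.Chars.lowerChar ch) 0) 2 ≠ 0 then
      (if PySem.Chars.isupper ch then PySem.Chars.lowerChar ch else PySem.Chars.upperChar ch)
    else ch)

def work_on_strings_alt (a : String) (b : String) : String :=
  String.ofList (altToggled a.toList b.toList ++ altToggled b.toList a.toList)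

-- ===== PRECONDITION & SPEC =====
def Spec_work_on_strings (a : String) (b : String) (out : String) : Prop := out = work_on_strings_alt a b
instance (a : String) (b : String) (out : String) : Decidable (Spec_work_on_strings a b out) := by unfold Spec_work_on_strings; infer_instance

-- ===== CLAIM (what is proved, stated in full; the proofs are below) =====
def Claim_equal_work_on_strings : Prop := ∀ (a : String) (b : String), Dom_work_on_strings a b → Spec_work_on_strings a b (work_on_strings a b)

-- ===== LEMMAS AND PROOFS =====

-- toggle c's case iff the number of case-insensitive matches of c in `a` is odd
def togIf (a : List Char) (c : Char) : Char :=
  if (a.countP (fun x => PySem.Chars.lowerChar x == PySem.Chars.lowerChar c)) % 2 = 1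
  then change_case c else c

lemma char_le_iff (c d : Char) : (c ≤ d) ↔ c.toNat ≤ d.toNat := by
  rw [Char.le_def]; exact UInt32.le_iff_toNat_le

lemma isupper_iff (c : Char) : PySem.Chars.isupper c = true ↔ 65 ≤ c.toNat ∧ c.toNat ≤ 90 := by
  simp [PySem.Chars.isupper, char_le_iff]

lemma islower_iff (c : Char) : PySem.Chars.islower c = true ↔ 97 ≤ c.toNat ∧ c.toNat ≤ 122 := by
  simp [PySem.Chars.islower, char_le_iff]

lemma toNat_ofNat_valid (n : Nat) (h : n.isValidChar) : (Char.ofNat n).toNat = n := by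
  simp [Char.ofNat, h]

lemma lowerChar_changeCase (c : Char) :
    PySem.Chars.lowerChar (change_case c) = PySem.Chars.lowerChar c := by
  unfold change_case PySem.Chars.lowerChar PySem.Chars.upperChar
  by_cases hu : PySem.Chars.isupper c = true
  · have h1 := (isupper_iff c).1 hu
    have hv : (c.toNat + 32).isValidChar := Or.inl (by omega)
    have ht := toNat_ofNat_valid _ hv
    have hnu : ¬ PySem.Chars.isupper (Char.ofNat (c.toNat + 32)) = true := by
      rw [isupper_iff, ht]; omega
    simp [hu, hnu]
  · by_cases hl : PySem.Chars.islower c = true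
    · have h1 := (islower_iff c).1 hl
      have hv : (c.toNat - 32).isValidChar := Or.inl (by omega)
      have ht := toNat_ofNat_valid _ hv
      have hup : PySem.Chars.isupper (Char.ofNat (c.toNat - 32)) = true := by
        rw [isupper_iff, ht]; omega
      simp [hu, hl, hup, ht]
      rw [show c.toNat - 32 + 32 = c.toNat by omega, Char.ofNat_toNat]
    · simp [hu, hl]

lemma changeCase_changeCase (c : Char) : change_case (change_case c) = c := by
  unfold change_case PySem.Chars.lowerChar PySem.Chars.upperChar
  by_cases hu : PySem.Chars.isupper c = true
  · have h1 := (isupper_iff c).1 hu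
    have hv : (c.toNat + 32).isValidChar := Or.inl (by omega)
    have ht := toNat_ofNat_valid _ hv
    have hnu : ¬ PySem.Chars.isupper (Char.ofNat (c.toNat + 32)) = true := by
      rw [isupper_iff, ht]; omega
    have hl2 : PySem.Chars.islower (Char.ofNat (c.toNat + 32)) = true := by
      rw [islower_iff, ht]; omega
    simp [hu, hnu, hl2, ht]
  · by_cases hl : PySem.Chars.islower c = true
    · have h1 := (islower_iff c).1 hl
      have hv : (c.toNat - 32).isValidChar := Or.inl (by omega)
      have ht := toNat_ofNat_valid _ hv
      have hup : PySem.Chars.isupper (Char.ofNat (c.toNat - 32)) = true := by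
        rw [isupper_iff, ht]; omega
      simp [hu, hl, hup, ht]
      rw [show c.toNat - 32 + 32 = c.toNat by omega, Char.ofNat_toNat]
    · simp [hu, hl]

-- one i-step folded into the parity view
lemma togIf_inner (a : List Char) (ai c : Char) :
    togIf a (if PySem.Chars.lowerChar ai = PySem.Chars.lowerChar c then change_case c else c)
      = togIf (ai :: a) c := by
  unfold togIf
  by_cases hm : PySem.Chars.lowerChar ai = PySem.Chars.lowerChar c
  · have hkey : ∀ x : Char,
        (PySem.Chars.lowerChar x == PySem.Chars.lowerChar (change_case c))
          = (PySem.Chars.lowerChar x == PySem.Chars.lowerChar c) := by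
      intro x; rw [lowerChar_changeCase]
    simp only [hm, List.countP_cons, hkey, beq_self_eq_true, if_pos]
    by_cases hpar : (a.countP fun x => PySem.Chars.lowerChar x == PySem.Chars.lowerChar c) % 2 = 1
    · have : ¬ ((a.countP fun x => PySem.Chars.lowerChar x == PySem.Chars.lowerChar c) + 1) % 2 = 1 := by
        omega
      simp [hpar, this, changeCase_changeCase]
    · have : ((a.countP fun x => PySem.Chars.lowerChar x == PySem.Chars.lowerChar c) + 1) % 2 = 1 := by
        omega
      simp [hpar, this]
  · have : (PySem.Chars.lowerChar ai == PySem.Chars.lowerChar c) = false := by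
      simp [hm]
    simp [hm, this]

lemma woSPass_eq (a b : List Char) : woSPass a b = b.map (togIf a) := by
  induction a generalizing b with
  | nil =>
    simp only [woSPass, List.foldl_nil]
    have h : ∀ c ∈ b, togIf [] c = id c := fun c _ => by simp [togIf]
    rw [List.map_congr_left h, List.map_id]
  | cons ai a ih =>
    show woSPass a (woSInner ai b) = _
    rw [ih, woSInner, List.map_map]
    refine List.map_congr_left (fun c _ => ?_)
    exact togIf_inner a ai c

-- toggling never changes the lowercased character, so match counts survive a pass
lemma lowerChar_togIf (a : List Char) (x : Char) :
    PySem.Chars.lowerChar (togIf a x) = PySem.Chars.lowerChar x := by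
  unfold togIf; split
  · exact lowerChar_changeCase x
  · rfl

lemma countP_map_togIf (a b : List Char) (c : Char) :
    List.countP (fun x => PySem.Chars.lowerChar x == PySem.Chars.lowerChar c) (b.map (togIf a))
      = List.countP (fun x => PySem.Chars.lowerChar x == PySem.Chars.lowerChar c) b := by
  rw [List.countP_map]
  refine List.countP_congr (fun x _ => ?_)
  simp only [Function.comp_apply, lowerChar_togIf]

lemma togIf_map (a b : List Char) : togIf (b.map (togIf a)) = togIf b := by
  funext c
  have h := countP_map_togIf a b c
  generalize b.map (togIf a) = l at h ⊢
  unfold togIf; rw [h]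

lemma altToggled_eq (s other : List Char) : altToggled s other = s.map (togIf other) := by
  unfold altToggled altCount
  refine List.map_congr_left (fun c _ => ?_)
  rw [show (other.foldl
        (fun d ch => d.insert (PySem.Chars.lowerChar ch) (d.getD (PySem.Chars.lowerChar ch) 0 + 1))
        (PySem.Dict.empty : PySem.Dict Char Int))
      = (other.map PySem.Chars.lowerChar).foldl
          (fun d k => d.insert k (d.getD k 0 + 1)) PySem.Dict.empty
    from (List.foldl_map (f := PySem.Chars.lowerChar)
      (g := fun (d : PySem.Dict Char Int) k => d.insert k (d.getD k 0 + 1))).symm,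
      PySem.Dict.getD_foldl_insert_add_one]
  have hempty : (PySem.Dict.empty : PySem.Dict Char Int).getD (PySem.Chars.lowerChar c) 0 = 0 := rfl
  rw [hempty, List.count_eq_countP, List.countP_map, zero_add]
  simp only [Function.comp_def]
  unfold togIf change_case
  rcases Nat.mod_two_eq_zero_or_one
      (List.countP (fun x => PySem.Chars.lowerChar x == PySem.Chars.lowerChar c) other) with h | h
  · have : PySem.Int.mod
        ((List.countP (fun x => PySem.Chars.lowerChar x == PySem.Chars.lowerChar c) other : Nat) : Int) 2 = 0 := by
      rw [show ((2:Int)) = ((2:Nat):Int) by norm_num, PySem.Int.mod_natCast, h]; rfl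
    simp only [this, ne_eq, not_true_eq_false, not_false_eq_true, if_neg]
    simp [h]
  · have : PySem.Int.mod
        ((List.countP (fun x => PySem.Chars.lowerChar x == PySem.Chars.lowerChar c) other : Nat) : Int) 2 = 1 := by
      rw [show ((2:Int)) = ((2:Nat):Int) by norm_num, PySem.Int.mod_natCast, h]; rfl
    simp [togIf, this, h]
    intro hdvd
    exfalso
    omega

-- ===== VERDICT (by name: the statement is the Claim_ definition above) =====
theorem work_on_strings_spec : Claim_equal_work_on_strings := by
  intro a b _
  show work_on_strings a b = work_on_strings_alt a b
  unfold work_on_strings work_on_strings_alt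
  show String.ofList (woSPass (woSPass a.toList b.toList) a.toList ++ woSPass a.toList b.toList) = _
  rw [woSPass_eq a.toList b.toList, woSPass_eq (b.toList.map (togIf a.toList)) a.toList,
      togIf_map, altToggled_eq a.toList b.toList, altToggled_eq b.toList a.toList]
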